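-- pv_equiv track=rewrite | github.com/philipdaubmeier/pixelpast-core | src/pixelpast/analytics/album_aggregate/builder.py | _build_ancestor_chain_by_id
-- ===== SOURCE A (Python) =====
-- def _build_ancestor_chain_by_id(
--     parent_id_by_node_id: dict[int, int | None],
-- ) -> dict[int, tuple[int, ...]]:
--     cache: dict[int, tuple[int, ...]] = {}
--
--     def resolve(node_id: int, active: set[int]) -> tuple[int, ...]:
--         cached = cache.get(node_id)
--         if cached is not None:
--             return cached
--         if node_id in active:
--             raise ValueError(f"Detected cyclic album hierarchy at node {node_id}.")
--
--         active.add(node_id)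
--         parent_id = parent_id_by_node_id.get(node_id)
--         if parent_id is None:
--             resolved = (node_id,)
--         else:
--             resolved = (node_id, *resolve(parent_id, active))
--         active.remove(node_id)
--         cache[node_id] = resolved
--         return resolved
--
--     return {
--         node_id: resolve(node_id, set())
--         for node_id in sorted(parent_id_by_node_id)
--     }
-- ===== SOURCE B (Python) =====
-- def _build_ancestor_chain_by_id(parent_id_by_node_id):
--     result = {}
--     for node_id in sorted(parent_id_by_node_id):
--         chain = []
--         seen = set()
--         cur = node_id
--         while cur is not None and cur not in seen:
--             seen.add(cur)
--             chain.append(cur)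
--             cur = parent_id_by_node_id.get(cur)
--         if cur is not None:
--             raise ValueError(f"Detected cyclic album hierarchy at node {cur}.")
--         result[node_id] = tuple(chain)
--     return result
-- ===== Notes on version B (the rewrite author's own statement) =====
-- stated objective: simpler
-- what changed: Drops the shared memoization cache and the recursive resolve entirely: each node's chain is computed by one plain while-loop walking parent links with a local seen-set for cycle detection.
import Mathlib
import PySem

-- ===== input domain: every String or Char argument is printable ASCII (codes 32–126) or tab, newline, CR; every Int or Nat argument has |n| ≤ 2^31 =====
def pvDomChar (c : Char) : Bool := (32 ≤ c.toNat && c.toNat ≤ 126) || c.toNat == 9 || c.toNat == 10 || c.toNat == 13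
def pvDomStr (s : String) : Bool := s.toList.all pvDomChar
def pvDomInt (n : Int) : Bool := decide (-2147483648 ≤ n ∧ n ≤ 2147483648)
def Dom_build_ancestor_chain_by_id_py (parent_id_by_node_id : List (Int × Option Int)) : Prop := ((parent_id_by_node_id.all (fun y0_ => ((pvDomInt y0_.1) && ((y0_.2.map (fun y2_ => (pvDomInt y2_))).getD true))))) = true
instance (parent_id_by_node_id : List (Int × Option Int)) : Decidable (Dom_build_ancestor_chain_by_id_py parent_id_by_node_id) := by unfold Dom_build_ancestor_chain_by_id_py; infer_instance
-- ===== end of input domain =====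

-- B drops A's shared memoization cache and recursion: each node's chain is one plain while-loop
-- walk up the parent links; same return value on acyclic inputs (objective: simpler).

-- ===== PORT A =====
-- resolve(node_id, active): fuel makes the Python recursion total; `none` = the ValueError raise
-- (cycle), excluded by Pre_. State threaded: the cache dict; returns (resolved, cache').
def pvResolveA (d : PySem.Dict Int (Option Int)) : Nat → PySem.Dict Int (List Int) → Int → PySem.Set Int → Option (List Int × PySem.Dict Int (List Int))
  | 0, _, _, _ => none
  | fuel + 1, cache, node, active =>
    match cache.get? node with
    | some c => some (c, cache)
    | none =>
      if PySem.Set.contains active node then none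
      else
        let active' := PySem.Set.add active node
        match (d.get? node).join with
        | none => some ([node], cache.insert node [node])
        | some p =>
          match pvResolveA d fuel cache p active' with
          | none => none
          | some (rs, cache') => some (node :: rs, cache'.insert node (node :: rs))

-- the body of A's dict comprehension: resolve node_id with a fresh empty active set
def pvStepA (d : PySem.Dict Int (Option Int)) (fuel : Nat)
    (st : PySem.Dict Int (List Int) × PySem.Dict Int (List Int)) (k : Int) :
    PySem.Dict Int (List Int) × PySem.Dict Int (List Int) :=
  match pvResolveA d fuel st.2 k PySem.Set.empty with
  | none => st
  | some (r, cache') => (st.1.insert k r, cache')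

def build_ancestor_chain_by_id_py (parent_id_by_node_id : List (Int × Option Int)) : List (Int × List Int) :=
  let d := PySem.Dict.ofList parent_id_by_node_id
  let ks := PySem.List.sorted d.keys (fun x => x) false
  ((ks.foldl (pvStepA d (parent_id_by_node_id.length + 1)) (PySem.Dict.empty, PySem.Dict.empty)).1).items

-- ===== PORT B =====
-- Source B's while-loop: follow parent links, appending to chain, with a local seen-set;
-- `none` = the ValueError raise (cycle), excluded by Pre_
def pvWalk (d : PySem.Dict Int (Option Int)) : Nat → PySem.Set Int → List Int → Int → Option (List Int)
  | 0, _, _, _ => none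
  | fuel + 1, seen, chain, cur =>
    if PySem.Set.contains seen cur then none
    else
      match (d.get? cur).join with
      | none => some (chain ++ [cur])
      | some nxt => pvWalk d fuel (PySem.Set.add seen cur) (chain ++ [cur]) nxt

def build_ancestor_chain_by_id_py_alt (parent_id_by_node_id : List (Int × Option Int)) : List (Int × List Int) :=
  let d := PySem.Dict.ofList parent_id_by_node_id
  let ks := PySem.List.sorted d.keys (fun x => x) false
  (ks.foldl (fun res k =>
      match pvWalk d (parent_id_by_node_id.length + 1) PySem.Set.empty [] k with
      | none => res
      | some chain => res.insert k chain) PySem.Dict.empty).items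

-- ===== PRECONDITION & SPEC =====
-- one application of the parent map: absent key or value None = root (steps to none)
def pvParentStep (d : PySem.Dict Int (Option Int)) (o : Option Int) : Option Int :=
  o.bind (fun i => (d.get? i).join)

-- Pre_ excludes exactly the cyclic hierarchies: on them Python A raises
-- ValueError("Detected cyclic album hierarchy at node …") (and so does B). Acyclicity stated in
-- closed form: iterating the parent map |input|+1 times from any key terminates (reaches none).
def Pre_build_ancestor_chain_by_id_py (parent_id_by_node_id : List (Int × Option Int)) : Prop :=
  ∀ k ∈ (PySem.Dict.ofList parent_id_by_node_id).keys,
    (pvParentStep (PySem.Dict.ofList parent_id_by_node_id))^[parent_id_by_node_id.length + 1] (some k) = none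

instance (parent_id_by_node_id : List (Int × Option Int)) : Decidable (Pre_build_ancestor_chain_by_id_py parent_id_by_node_id) := by
  unfold Pre_build_ancestor_chain_by_id_py; infer_instance

def pvWitness_build_ancestor_chain_by_id_py : (List (Int × Option Int)) :=
  [(3, some 1), (1, none), (2, some 1), (5, some 10)]

def Spec_build_ancestor_chain_by_id_py (parent_id_by_node_id : List (Int × Option Int)) (out : List (Int × List Int)) : Prop := out = build_ancestor_chain_by_id_py_alt parent_id_by_node_id
instance (parent_id_by_node_id : List (Int × Option Int)) (out : List (Int × List Int)) : Decidable (Spec_build_ancestor_chain_by_id_py parent_id_by_node_id out) := by unfold Spec_build_ancestor_chain_by_id_py; infer_instance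

-- ===== CLAIM (what is proved, stated in full; the proofs are below) =====
def Claim_equal_build_ancestor_chain_by_id_py : Prop := ∀ (parent_id_by_node_id : List (Int × Option Int)), Dom_build_ancestor_chain_by_id_py parent_id_by_node_id → Pre_build_ancestor_chain_by_id_py parent_id_by_node_id → Spec_build_ancestor_chain_by_id_py parent_id_by_node_id (build_ancestor_chain_by_id_py parent_id_by_node_id)

-- ===== LEMMAS AND PROOFS =====

-- the canonical ancestor chain of a node, computed with explicit fuel
def pvChainF (d : PySem.Dict Int (Option Int)) : Nat → Int → Option (List Int)
  | 0, _ => none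
  | f + 1, i =>
    match (d.get? i).join with
    | none => some [i]
    | some p => (pvChainF d f p).map (i :: ·)

-- a cache is good when every stored chain is the canonical chain of its key
def pvGood (d : PySem.Dict Int (Option Int)) (cache : PySem.Dict Int (List Int)) : Prop :=
  ∀ k v, cache.get? k = some v → pvChainF d v.length k = some v

lemma pvParentStep_none (d : PySem.Dict Int (Option Int)) : pvParentStep d none = none := rfl

lemma pvIter_none (d : PySem.Dict Int (Option Int)) (t : Nat) : (pvParentStep d)^[t] none = none :=
  Function.iterate_fixed (pvParentStep_none d) t

lemma pv_no_period (d : PySem.Dict Int (Option Int)) (x : Int) {j m : Nat}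
    (h1 : (pvParentStep d)^[j] (some x) = some x) (hj : 1 ≤ j)
    (h2 : (pvParentStep d)^[m] (some x) = none) : False := by
  have hm : 1 ≤ m := by
    rcases Nat.eq_zero_or_pos m with h | h
    · subst h; simp at h2
    · exact h
  have hrep : ∀ t : Nat, (pvParentStep d)^[j * t] (some x) = some x := by
    intro t
    induction t with
    | zero => simp
    | succ t ih =>
      have : j * (t + 1) = j + j * t := by ring
      rw [this, Function.iterate_add_apply, ih, h1]
  have hge : m ≤ j * m := Nat.le_mul_of_pos_left m hj
  have : (pvParentStep d)^[j * m] (some x) = none := by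
    have : j * m = (j * m - m) + m := by omega
    rw [this, Function.iterate_add_apply, h2, pvIter_none]
  rw [hrep m] at this
  simp at this

lemma pvChainF_mono (d : PySem.Dict Int (Option Int)) {m m' : Nat} {i : Int} {l : List Int}
    (h : pvChainF d m i = some l) (hle : m ≤ m') : pvChainF d m' i = some l := by
  induction m generalizing i l m' with
  | zero => simp [pvChainF] at h
  | succ f ih =>
    obtain ⟨f', rfl⟩ : ∃ f', m' = f' + 1 := ⟨m' - 1, by omega⟩
    rw [pvChainF] at h ⊢
    cases hp : (d.get? i).join with
    | none => simp only [hp] at h ⊢; exact h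
    | some p =>
      simp only [hp] at h ⊢
      cases hc : pvChainF d f p with
      | none => simp [hc] at h
      | some l' =>
        simp only [hc] at h
        rw [ih hc (by omega)]
        exact h

lemma pvChainF_unique (d : PySem.Dict Int (Option Int)) {m m' : Nat} {i : Int} {l l' : List Int}
    (h : pvChainF d m i = some l) (h' : pvChainF d m' i = some l') : l = l' := by
  have h1 := pvChainF_mono d h (Nat.le_max_left m m')
  have h2 := pvChainF_mono d h' (Nat.le_max_right m m')
  rw [h1] at h2
  exact (Option.some.injEq _ _).mp h2

lemma pvGood_insert (d : PySem.Dict Int (Option Int)) {cache : PySem.Dict Int (List Int)}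
    (hg : pvGood d cache) {k : Int} {v : List Int} (hv : pvChainF d v.length k = some v) :
    pvGood d (cache.insert k v) := by
  intro k' v' h
  rw [PySem.Dict.get?_insert] at h
  split at h
  · cases h; subst ‹k' = k›; exact hv
  · exact hg k' v' h

-- main lemma for A's resolve
lemma pvResolveA_spec (d : PySem.Dict Int (Option Int)) :
    ∀ (fuel : Nat) (cache : PySem.Dict Int (List Int)) (node : Int) (active : PySem.Set Int),
    (pvParentStep d)^[fuel] (some node) = none →
    pvGood d cache →
    (∀ a, PySem.Set.contains active a = true → ∃ j, 1 ≤ j ∧ (pvParentStep d)^[j] (some a) = some node) →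
    ∃ r cache', pvResolveA d fuel cache node active = some (r, cache') ∧
      pvChainF d r.length node = some r ∧ pvGood d cache' := by
  intro fuel
  induction fuel with
  | zero => intro cache node active hne; simp at hne
  | succ f ih =>
    intro cache node active hne hg hact
    rw [pvResolveA]
    cases hc : cache.get? node with
    | some c => exact ⟨c, cache, rfl, hg node c hc, hg⟩
    | none =>
      simp only
      by_cases hmem : PySem.Set.contains active node = true
      · obtain ⟨j, hj1, hj⟩ := hact node hmem
        exact absurd (pv_no_period d node hj hj1 hne) id
      · rw [Bool.not_eq_true] at hmem
        rw [hmem]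
        simp only [Bool.false_eq_true, if_false]
        have hstep : pvParentStep d (some node) = (d.get? node).join := rfl
        cases hp : (d.get? node).join with
        | none =>
          refine ⟨[node], cache.insert node [node], rfl, ?_, ?_⟩
          · simp [pvChainF, hp]
          · exact pvGood_insert d hg (by simp [pvChainF, hp])
        | some p =>
          have hne' : (pvParentStep d)^[f] (some p) = none := by
            rw [Function.iterate_succ_apply, hstep, hp] at hne
            exact hne
          have hact' : ∀ a, PySem.Set.contains (PySem.Set.add active node) a = true →
              ∃ j, 1 ≤ j ∧ (pvParentStep d)^[j] (some a) = some p := by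
            intro a ha
            rw [PySem.Set.contains_iff, PySem.Set.mem_add] at ha
            rcases ha with ha | rfl
            · obtain ⟨j, hj1, hj⟩ := hact a (by rw [PySem.Set.contains_iff]; exact ha)
              refine ⟨j + 1, by omega, ?_⟩
              rw [Function.iterate_succ_apply', hj, hstep, hp]
            · exact ⟨1, le_refl 1, by simp [hstep, hp]⟩
          obtain ⟨rs, cache', hrun, hch, hg'⟩ := ih cache p (PySem.Set.add active node) hne' hg hact'
          refine ⟨node :: rs, cache'.insert node (node :: rs), by simp only [hrun], ?_, ?_⟩
          · simp only [List.length_cons, pvChainF, hp, hch, Option.map_some]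
          · exact pvGood_insert d hg' (by simp only [List.length_cons, pvChainF, hp, hch, Option.map_some])

-- main lemma for B's cache-free walk: it returns chain ++ the canonical chain of cur
lemma pvWalk_spec (d : PySem.Dict Int (Option Int)) :
    ∀ (fuel : Nat) (seen : PySem.Set Int) (chain : List Int) (cur : Int),
    (pvParentStep d)^[fuel] (some cur) = none →
    (∀ a, PySem.Set.contains seen a = true → ∃ j, 1 ≤ j ∧ (pvParentStep d)^[j] (some a) = some cur) →
    ∃ p, pvWalk d fuel seen chain cur = some (chain ++ p) ∧ pvChainF d p.length cur = some p := by
  intro fuel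
  induction fuel with
  | zero => intro seen chain cur hne; simp at hne
  | succ f ih =>
    intro seen chain cur hne hseen
    rw [pvWalk]
    by_cases hmem : PySem.Set.contains seen cur = true
    · obtain ⟨j, hj1, hj⟩ := hseen cur hmem
      exact absurd (pv_no_period d cur hj hj1 hne) id
    · rw [Bool.not_eq_true] at hmem
      rw [hmem]
      simp only [Bool.false_eq_true, if_false]
      have hstep : pvParentStep d (some cur) = (d.get? cur).join := rfl
      cases hp : (d.get? cur).join with
      | none => exact ⟨[cur], rfl, by simp [pvChainF, hp]⟩
      | some nxt =>
        have hne' : (pvParentStep d)^[f] (some nxt) = none := by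
          rw [Function.iterate_succ_apply, hstep, hp] at hne
          exact hne
        have hseen' : ∀ a, PySem.Set.contains (PySem.Set.add seen cur) a = true →
            ∃ j, 1 ≤ j ∧ (pvParentStep d)^[j] (some a) = some nxt := by
          intro a ha
          rw [PySem.Set.contains_iff, PySem.Set.mem_add] at ha
          rcases ha with ha | rfl
          · obtain ⟨j, hj1, hj⟩ := hseen a (by rw [PySem.Set.contains_iff]; exact ha)
            refine ⟨j + 1, by omega, ?_⟩
            rw [Function.iterate_succ_apply', hj, hstep, hp]
          · exact ⟨1, le_refl 1, by simp [hstep, hp]⟩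
        obtain ⟨p, hrun, hch⟩ := ih (PySem.Set.add seen cur) (chain ++ [cur]) nxt hne' hseen'
        refine ⟨cur :: p, by simp only [hrun]; simp, ?_⟩
        simp only [List.length_cons, pvChainF, hp, hch, Option.map_some]

-- the two folds over the sorted keys build the same result dict
lemma pvFold_eq (d : PySem.Dict Int (Option Int)) (fuel : Nat) :
    ∀ (ks : List Int) (res cacheA : PySem.Dict Int (List Int)),
    pvGood d cacheA →
    (∀ k ∈ ks, (pvParentStep d)^[fuel] (some k) = none) →
    (ks.foldl (pvStepA d fuel) (res, cacheA)).1 =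
      ks.foldl (fun r k =>
        match pvWalk d fuel PySem.Set.empty [] k with
        | none => r
        | some chain => r.insert k chain) res := by
  intro ks
  induction ks with
  | nil => intro res cacheA _ _; rfl
  | cons k ks ih =>
    intro res cacheA hgA hne
    obtain ⟨rA, cacheA', hrunA, hchA, hgA'⟩ :=
      pvResolveA_spec d fuel cacheA k ([] : PySem.Set Int) (hne k (by simp)) hgA (by intro a ha; simp at ha)
    obtain ⟨p, hrunB, hchB⟩ :=
      pvWalk_spec d fuel ([] : PySem.Set Int) [] k (hne k (by simp)) (by intro a ha; simp at ha)
    have hrp : rA = p := pvChainF_unique d hchA hchB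
    simp only [List.foldl_cons, pvStepA, hrunA, PySem.Set.empty, hrunB, List.nil_append, ← hrp]
    exact ih (res.insert k rA) cacheA' hgA' (fun k' hk' => hne k' (by simp [hk']))

lemma pvGood_empty (d : PySem.Dict Int (Option Int)) : pvGood d PySem.Dict.empty := by
  intro k v h
  simp [PySem.Dict.get?_empty] at h

-- ===== VERDICT (by name: the statement is the Claim_ definition above) =====
theorem build_ancestor_chain_by_id_py_spec : Claim_equal_build_ancestor_chain_by_id_py := by
  intro l _ hpre
  unfold Spec_build_ancestor_chain_by_id_py
  unfold build_ancestor_chain_by_id_py build_ancestor_chain_by_id_py_alt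
  simp only
  congr 1
  apply pvFold_eq
  · exact pvGood_empty _
  · intro k hk
    exact hpre k ((PySem.List.mem_sorted _ _ _ _).mp hk)
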